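-- pv_equiv track=rewrite | github.com/weniv/pyalgo100 | src/py/answer.py | solution
-- ===== SOURCE A (Python) =====
-- def solution(data):
--     matrix, range_values = data
--     min_value, max_value = float("inf"), float("-inf")
--     lower_bound, upper_bound = range_values
--
--     for row in matrix:
--         for item in row:
--             if lower_bound <= item <= upper_bound:
--                 min_value = min(min_value, item)
--                 max_value = max(max_value, item)
--
--     return (max_value, min_value) if min_value != float("inf") else (None, None)
-- ===== SOURCE B (Python) =====
-- def solution(data):
--     matrix, (lower_bound, upper_bound) = data
--     vals = [x for row in matrix for x in row if lower_bound <= x <= upper_bound]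
--     return (max(vals), min(vals)) if vals else (None, None)
-- ===== Notes on version B (the rewrite author's own statement) =====
-- stated objective: simpler
-- what changed: Replaces the fused nested-loop pass that tracks running min and max against infinity sentinels with a filter-then-two-reductions decomposition: collect the in-range elements once, then take max() and min() of that list.
import Mathlib
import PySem

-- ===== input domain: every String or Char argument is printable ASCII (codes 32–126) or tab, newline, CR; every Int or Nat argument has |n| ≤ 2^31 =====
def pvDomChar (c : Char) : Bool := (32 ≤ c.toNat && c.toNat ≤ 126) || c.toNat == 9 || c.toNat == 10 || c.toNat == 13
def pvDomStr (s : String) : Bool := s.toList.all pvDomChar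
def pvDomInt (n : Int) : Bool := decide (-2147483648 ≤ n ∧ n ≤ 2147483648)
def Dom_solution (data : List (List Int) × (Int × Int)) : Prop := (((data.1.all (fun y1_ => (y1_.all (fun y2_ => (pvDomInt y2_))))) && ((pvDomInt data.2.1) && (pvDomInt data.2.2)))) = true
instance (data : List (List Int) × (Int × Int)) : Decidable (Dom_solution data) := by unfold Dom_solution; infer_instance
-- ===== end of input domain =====

-- B replaces A's fused running-min/max pass with filter-then-max/min (objective: simpler).


-- ===== PORT A =====
-- state (min_value, max_value); 'none' plays float("inf") / float("-inf")
def solutionStep (lo hi : Int) (st : Option Int × Option Int) (item : Int) :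
    Option Int × Option Int :=
  if lo ≤ item ∧ item ≤ hi then
    (some (match st.1 with | none => item | some m => min m item),
     some (match st.2 with | none => item | some m => max m item))
  else st

def solution (data : List (List Int) × (Int × Int)) : Option Int × Option Int :=
  let matrix := data.1
  let lo := data.2.1
  let hi := data.2.2
  let st := matrix.foldl (fun st row => row.foldl (solutionStep lo hi) st) (none, none)
  match st.1 with
  | none => (none, none)
  | some _ => (st.2, st.1)

-- ===== PORT B =====
def solution_alt (data : List (List Int) × (Int × Int)) : Option Int × Option Int :=
  let lo := data.2.1
  let hi := data.2.2
  let vals := data.1.flatMap (fun row => row.filter (fun x => lo ≤ x ∧ x ≤ hi))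
  if vals ≠ [] then (PySem.List.max? vals (fun y => y), PySem.List.min? vals (fun y => y))
  else (none, none)

-- ===== PRECONDITION & SPEC =====
def Spec_solution (data : List (List Int) × (Int × Int)) (out : Option Int × Option Int) : Prop := out = solution_alt data
instance (data : List (List Int) × (Int × Int)) (out : Option Int × Option Int) : Decidable (Spec_solution data out) := by unfold Spec_solution; infer_instance

-- ===== CLAIM (what is proved, stated in full; the proofs are below) =====
def Claim_equal_solution : Prop := ∀ (data : List (List Int) × (Int × Int)), Dom_solution data → Spec_solution data (solution data)

-- ===== LEMMAS AND PROOFS =====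

-- A's fold over one row, started from the min/max of accumulator `acc`, equals
-- the min/max of acc ++ filtered row.
def accSt (acc : List Int) : Option Int × Option Int :=
  (PySem.List.min? acc (fun y => y), PySem.List.max? acc (fun y => y))

theorem step_acc (lo hi : Int) (acc : List Int) (x : Int) :
    solutionStep lo hi (accSt acc) x =
      accSt (acc ++ (if lo ≤ x ∧ x ≤ hi then [x] else [])) := by
  unfold solutionStep accSt
  split_ifs with h
  · cases acc with
    | nil => simp [PySem.List.min?, PySem.List.max?]
    | cons a t =>
      simp only [PySem.List.min?_id_cons, PySem.List.max?_id_cons, List.cons_append,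
        List.foldl_append, List.foldl_cons, List.foldl_nil]
  · simp

theorem foldl_row_acc (lo hi : Int) (row : List Int) (acc : List Int) :
    row.foldl (solutionStep lo hi) (accSt acc) =
      accSt (acc ++ row.filter (fun x => lo ≤ x ∧ x ≤ hi)) := by
  induction row generalizing acc with
  | nil => simp
  | cons x t ih =>
    simp only [List.foldl_cons, step_acc]
    rw [ih]
    by_cases h : lo ≤ x ∧ x ≤ hi <;> simp [h]

theorem foldl_matrix_acc (lo hi : Int) (m : List (List Int)) (acc : List Int) :
    m.foldl (fun st row => row.foldl (solutionStep lo hi) st) (accSt acc) =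
      accSt (acc ++ m.flatMap (fun row => row.filter (fun x => lo ≤ x ∧ x ≤ hi))) := by
  induction m generalizing acc with
  | nil => simp
  | cons r t ih =>
    simp only [List.foldl_cons, foldl_row_acc, ih, List.flatMap_cons, List.append_assoc]

-- ===== VERDICT (by name: the statement is the Claim_ definition above) =====
theorem solution_spec : Claim_equal_solution := by
  intro data _
  unfold Spec_solution solution solution_alt
  have h := foldl_matrix_acc data.2.1 data.2.2 data.1 []
  simp only [List.nil_append] at h
  have hacc : accSt ([] : List Int) = (none, none) := by
    simp [accSt, PySem.List.min?, PySem.List.max?]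
  rw [hacc] at h
  simp only [h, accSt]
  set vals := data.1.flatMap (fun row => row.filter (fun x => data.2.1 ≤ x ∧ x ≤ data.2.2)) with hv
  cases vals with
  | nil => simp [PySem.List.min?]
  | cons a t =>
    simp [PySem.List.min?_id_cons, PySem.List.max?_id_cons]
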